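-- pv_equiv track=rewrite | github.com/amchiclet/compiler-evaluation-experiments | transformers/loop_interchange.py | calculate_strides
-- ===== SOURCE A (Python) =====
-- def calculate_strides(n_dimensions):
--     strides = []
--     prev = 1
--     for d in range(n_dimensions):
--         size = prev * (d+1)
--         prev = size
--         strides.append(size)
--     strides.reverse()
--     return strides
-- ===== SOURCE B (Python) =====
-- import math
--
-- def calculate_strides(n_dimensions):
--     return [math.factorial(n_dimensions - i) for i in range(n_dimensions)]
-- ===== Notes on version B (the rewrite author's own statement) =====
-- stated objective: idiomatic
-- what changed: Replaces the running-product accumulator plus final reverse with a single comprehension that computes each reversed stride directly as math.factorial(n_dimensions - i).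
import Mathlib
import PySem

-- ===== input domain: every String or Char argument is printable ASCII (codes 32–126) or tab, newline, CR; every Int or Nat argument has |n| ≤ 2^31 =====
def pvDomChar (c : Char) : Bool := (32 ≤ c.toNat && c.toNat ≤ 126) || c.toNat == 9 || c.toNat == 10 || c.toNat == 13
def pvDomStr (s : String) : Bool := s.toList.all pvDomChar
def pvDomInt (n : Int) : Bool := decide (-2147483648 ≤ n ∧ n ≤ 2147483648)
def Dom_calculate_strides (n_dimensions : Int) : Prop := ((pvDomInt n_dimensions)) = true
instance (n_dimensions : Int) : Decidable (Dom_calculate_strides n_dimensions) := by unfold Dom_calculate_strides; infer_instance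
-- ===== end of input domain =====

-- B computes each reversed stride directly as factorial(n_dimensions - i) instead of accumulating partial products and reversing (idiomatic rewrite, no speed claim).

-- ===== PORT A =====
-- accumulates (strides, prev) over range(n_dimensions), then reverses, as in A
def calculate_strides (n_dimensions : Int) : List Int :=
  let st := (PySem.List.pyRange 0 n_dimensions 1).foldl
    (fun (acc : List Int × Int) d =>
      let size := acc.2 * (d + 1)
      (acc.1 ++ [size], size)) ([], 1)
  st.1.reverse

-- ===== PORT B =====
-- math.factorial(n_dimensions - i) ported as Nat.factorial (argument is positive for every i in range)
def calculate_strides_alt (n_dimensions : Int) : List Int :=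
  (PySem.List.pyRange 0 n_dimensions 1).map
    (fun i => ((n_dimensions - i).toNat.factorial : Int))

-- ===== PRECONDITION & SPEC =====
def Spec_calculate_strides (n_dimensions : Int) (out : List Int) : Prop := out = calculate_strides_alt n_dimensions
instance (n_dimensions : Int) (out : List Int) : Decidable (Spec_calculate_strides n_dimensions out) := by unfold Spec_calculate_strides; infer_instance

-- ===== CLAIM (what is proved, stated in full; the proofs are below) =====
def Claim_equal_calculate_strides : Prop := ∀ (n_dimensions : Int), Dom_calculate_strides n_dimensions → Spec_calculate_strides n_dimensions (calculate_strides n_dimensions)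

-- ===== LEMMAS AND PROOFS =====

-- the loop invariant of A: after m iterations the list is [1!, 2!, …, m!] and prev = m!
theorem pv_loop_inv (m : Nat) :
    ((List.range m).map Int.ofNat).foldl
      (fun (acc : List Int × Int) d => (acc.1 ++ [acc.2 * (d + 1)], acc.2 * (d + 1))) ([], 1)
    = ((List.range m).map (fun k => ((k + 1).factorial : Int)), (m.factorial : Int)) := by
  induction m with
  | zero => simp [Nat.factorial]
  | succ m ih =>
      rw [List.range_succ, List.map_append, List.map_append, List.foldl_append, ih]
      simp [Nat.factorial_succ]
      ring

theorem calculate_strides_spec : Claim_equal_calculate_strides := by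
  intro n _
  unfold Spec_calculate_strides calculate_strides calculate_strides_alt
  rw [PySem.List.pyRange_one]
  simp only [Int.sub_zero, Int.zero_add]
  rw [show (fun k : Nat => (k : Int)) = Int.ofNat from rfl, pv_loop_inv]
  apply List.ext_getElem
  · simp
  · intro k h1 h2
    simp only [List.length_reverse, List.length_map, List.length_range] at h1
    rw [List.getElem_reverse]
    simp only [List.getElem_map, List.getElem_range, List.length_map, List.length_range]
    have hc : (n - Int.ofNat k).toNat = n.toNat - k := by
      simp only [Int.ofNat_eq_natCast]
      omega
    have hd : n.toNat - 1 - k + 1 = n.toNat - k := by omega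
    rw [hc, hd]
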